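-- pv_equiv track=rewrite | github.com/vri-nda/litcoder | Cookies.py | doSomething
-- ===== SOURCE A (Python) =====
-- def doSomething(candies, target):
--     steps = 0
--
--     while len(candies) > 1 and min(candies) < target:
--         candies.sort()
--         combined_sweetness = candies[0] + 2 * candies[1]
--         candies = candies[2:] + [combined_sweetness]
--         steps += 1
--
--     return steps if min(candies) >= target else -1
-- ===== SOURCE B (Python) =====
-- def _insort(x, xs):
--     for i, v in enumerate(xs):
--         if x <= v:
--             return xs[:i] + [x] + xs[i:]
--     return xs + [x]
--
--
-- def doSomething(candies, target):
--     xs = sorted(candies)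
--     steps = 0
--     while len(xs) > 1 and xs[0] < target:
--         combined = xs[0] + 2 * xs[1]
--         xs = _insort(combined, xs[2:])
--         steps += 1
--     return steps if xs[0] >= target else -1
-- ===== Notes on version B (the rewrite author's own statement) =====
-- stated objective: faster
-- what changed: B sorts the list once and keeps it sorted by a single ordered insertion of each combined cookie, instead of A's full re-sort of the whole list (plus a min() rescan) on every loop iteration; the loop test reads the sorted head.
import Mathlib
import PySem

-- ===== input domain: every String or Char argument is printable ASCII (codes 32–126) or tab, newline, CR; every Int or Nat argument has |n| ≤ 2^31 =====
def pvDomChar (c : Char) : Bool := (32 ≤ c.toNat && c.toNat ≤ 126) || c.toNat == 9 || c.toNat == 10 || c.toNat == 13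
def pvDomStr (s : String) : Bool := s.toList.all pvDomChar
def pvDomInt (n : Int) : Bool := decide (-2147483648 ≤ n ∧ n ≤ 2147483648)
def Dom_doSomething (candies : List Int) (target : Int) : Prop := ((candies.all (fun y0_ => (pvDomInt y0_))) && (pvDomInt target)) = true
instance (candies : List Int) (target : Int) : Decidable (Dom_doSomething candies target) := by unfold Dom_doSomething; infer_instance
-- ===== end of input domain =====

-- B sorts once and maintains the sorted list by ordered insertion instead of re-sorting every
-- iteration. A sorts its argument in place (callers can observe that); B does not mutate its
-- argument — the equivalence proved here is about the RETURN value only.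

-- ===== PORT A =====
-- the while loop of A: re-sort, combine the two smallest, loop; length drops by 1 each round
def doSomethingLoopA (candies : List Int) (target : Int) (steps : Int) : Int :=
  if h : 1 < candies.length ∧ (PySem.List.min? candies (fun x => x)).getD target < target then
    doSomethingLoopA
      (PySem.List.slice (PySem.List.sorted candies (fun x => x) false) (some 2) none
        ++ [PySem.List.pyGetD (PySem.List.sorted candies (fun x => x) false) 0 0
            + 2 * PySem.List.pyGetD (PySem.List.sorted candies (fun x => x) false) 1 0])
      target (steps + 1)
  else
    -- 'return steps if min(candies) >= target else -1'; min([]) raises: Pre_ excludes []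
    if (PySem.List.min? candies (fun x => x)).getD (target - 1) ≥ target then steps else -1
termination_by candies.length
decreasing_by
  have hl : (PySem.List.sorted candies (fun x => x) false).length = candies.length :=
    PySem.List.length_sorted ..
  have h2 : PySem.List.slice (PySem.List.sorted candies (fun x => x) false) (some 2) none
      = (PySem.List.sorted candies (fun x => x) false).drop 2 := by
    simpa using PySem.List.slice_from_natCast (PySem.List.sorted candies (fun x => x) false) 2
  simp [h2, List.length_drop, hl]
  omega

def doSomething (candies : List Int) (target : Int) : Int :=
  doSomethingLoopA candies target 0

-- ===== PORT B =====
-- _insort: walk the sorted list, place x before the first element it is ≤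
def insortAlt (x : Int) : List Int → List Int
  | [] => [x]
  | v :: rest => if x ≤ v then x :: v :: rest else v :: insortAlt x rest

lemma length_insortAlt (x : Int) (l : List Int) : (insortAlt x l).length = l.length + 1 := by
  induction l with
  | nil => rfl
  | cons v rest ih => by_cases h : x ≤ v <;> simp [insortAlt, h, ih]

-- B's while loop over the sorted list xs: combine xs[0], xs[1], insert the result back in order
def doSomethingLoopAlt (xs : List Int) (target : Int) (steps : Int) : Int :=
  if h : 1 < xs.length ∧ PySem.List.pyGetD xs 0 target < target then
    doSomethingLoopAlt
      (insortAlt (PySem.List.pyGetD xs 0 0 + 2 * PySem.List.pyGetD xs 1 0)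
        (PySem.List.slice xs (some 2) none))
      target (steps + 1)
  else
    -- 'return steps if xs[0] >= target else -1'; xs[0] on [] raises: Pre_ excludes []
    if PySem.List.pyGetD xs 0 (target - 1) ≥ target then steps else -1
termination_by xs.length
decreasing_by
  have h2 : PySem.List.slice xs (some 2) none = xs.drop 2 := by
    simpa using PySem.List.slice_from_natCast xs 2
  simp [length_insortAlt, h2, List.length_drop]
  omega

def doSomething_alt (candies : List Int) (target : Int) : Int :=
  doSomethingLoopAlt (PySem.List.sorted candies (fun x => x) false) target 0

-- ===== PRECONDITION & SPEC =====
-- Pre_ excludes only the empty list, on which A raises ValueError (min of empty sequence).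
def Pre_doSomething (candies : List Int) (target : Int) : Prop := candies ≠ []
instance (candies : List Int) (target : Int) : Decidable (Pre_doSomething candies target) := by
  unfold Pre_doSomething; infer_instance

def pvWitness_doSomething : List Int × Int := ([1, 2, 3], 5)

def Spec_doSomething (candies : List Int) (target : Int) (out : Int) : Prop :=
  out = doSomething_alt candies target
instance (candies : List Int) (target : Int) (out : Int) : Decidable (Spec_doSomething candies target out) := by
  unfold Spec_doSomething; infer_instance

-- ===== CLAIM (what is proved, stated in full; the proofs are below) =====
def Claim_equal_doSomething : Prop := ∀ (candies : List Int) (target : Int),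
  Dom_doSomething candies target → Pre_doSomething candies target →
  Spec_doSomething candies target (doSomething candies target)

-- ===== LEMMAS AND PROOFS =====

lemma insortAlt_perm (x : Int) (l : List Int) : (insortAlt x l).Perm (x :: l) := by
  induction l with
  | nil => simp [insortAlt]
  | cons v rest ih =>
    by_cases h : x ≤ v
    · simp [insortAlt, h]
    · simp only [insortAlt, if_neg h]
      exact (ih.cons v).trans (List.Perm.swap x v rest)

lemma insortAlt_pairwise (x : Int) (l : List Int) (h : l.Pairwise (· ≤ ·)) :
    (insortAlt x l).Pairwise (· ≤ ·) := by
  induction l with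
  | nil => simp [insortAlt]
  | cons v rest ih =>
    rcases List.pairwise_cons.mp h with ⟨hv, hrest⟩
    by_cases hx : x ≤ v
    · rw [insortAlt, if_pos hx]
      refine List.pairwise_cons.mpr ⟨?_, h⟩
      intro y hy
      rcases List.mem_cons.mp hy with rfl | hy
      · exact hx
      · exact le_trans hx (hv y hy)
    · rw [insortAlt, if_neg hx]
      refine List.pairwise_cons.mpr ⟨?_, ih hrest⟩
      intro y hy
      rcases (List.Perm.mem_iff (insortAlt_perm x rest)).mp hy with hxy
      rcases List.mem_cons.mp hxy with rfl | hy'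
      · exact le_of_not_ge hx
      · exact hv y hy'

-- min(xs) is the head of sorted(xs) (both are the minimum value of a nonempty Int list)
lemma min?_eq_head (candies : List Int) (h : candies ≠ []) :
    PySem.List.min? candies (fun x => x)
      = (PySem.List.sorted candies (fun x => x) false).head? := by
  have hs : PySem.List.sorted candies (fun x => x) false ≠ [] := by
    intro hnil
    exact h ((PySem.List.sorted_eq_nil_iff ..).mp hnil)
  obtain ⟨m0, t, hst⟩ := List.exists_cons_of_ne_nil hs
  obtain ⟨m, hm⟩ : ∃ m, PySem.List.min? candies (fun x => x) = some m := by
    cases hmin : PySem.List.min? candies (fun x => x) with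
    | none => exact absurd ((PySem.List.min?_eq_none_iff ..).mp hmin) h
    | some m => exact ⟨m, rfl⟩
  have hmmem : m ∈ candies := PySem.List.min?_mem hm
  have hm0mem : m0 ∈ candies := by
    have : m0 ∈ PySem.List.sorted candies (fun x => x) false := by simp [hst]
    exact (PySem.List.mem_sorted ..).mp this
  have h1 : m ≤ m0 := PySem.List.min?_isMin hm m0 hm0mem
  have h2 : m0 ≤ m := PySem.List.key_head_sorted_le candies (fun x => x) hst m hmmem
  rw [hm, hst]
  simp [le_antisymm h1 h2]

-- sorted list: dropping a prefix keeps it pairwise-ordered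
lemma drop2_pairwise (s : List Int) (h : s.Pairwise (· ≤ ·)) :
    (s.drop 2).Pairwise (· ≤ ·) :=
  h.sublist (List.drop_sublist 2 s)

-- core: A's loop on any nonempty list equals B's loop on its sorted form
lemma loop_eq (n : Nat) : ∀ (candies : List Int), candies.length ≤ n → candies ≠ [] →
    ∀ (target steps : Int),
      doSomethingLoopA candies target steps
        = doSomethingLoopAlt (PySem.List.sorted candies (fun x => x) false) target steps := by
  induction n with
  | zero =>
    intro candies hlen hne
    exact absurd (List.length_eq_zero_iff.mp (Nat.le_zero.mp hlen)) hne
  | succ n ih =>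
    intro candies hlen hne target steps
    set s := PySem.List.sorted candies (fun x => x) false with hs_def
    have hsl : s.length = candies.length := PySem.List.length_sorted ..
    have hsne : s ≠ [] := by
      intro hnil; exact hne ((PySem.List.sorted_eq_nil_iff ..).mp hnil)
    obtain ⟨m0, t, hst⟩ := List.exists_cons_of_ne_nil hsne
    have hmin : PySem.List.min? candies (fun x => x) = some m0 := by
      rw [min?_eq_head candies hne, ← hs_def, hst]; rfl
    have hget0 : ∀ d : Int, PySem.List.pyGetD s 0 d = m0 := by
      intro d; rw [hst]; exact PySem.List.pyGetD_zero_cons ..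
    have hslice : PySem.List.slice s (some 2) none = s.drop 2 := by
      simpa using PySem.List.slice_from_natCast s 2
    rw [doSomethingLoopA, doSomethingLoopAlt]
    have hcond : (1 < candies.length ∧ (PySem.List.min? candies (fun x => x)).getD target < target)
        ↔ (1 < s.length ∧ PySem.List.pyGetD s 0 target < target) := by
      rw [hmin, hget0, hsl]; simp
    by_cases hc : 1 < s.length ∧ PySem.List.pyGetD s 0 target < target
    · rw [dif_pos (hcond.mpr hc), dif_pos hc]
      have hc_eq : PySem.List.pyGetD (PySem.List.sorted candies (fun x => x) false) 0 0
          + 2 * PySem.List.pyGetD (PySem.List.sorted candies (fun x => x) false) 1 0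
          = PySem.List.pyGetD s 0 0 + 2 * PySem.List.pyGetD s 1 0 := by rw [← hs_def]
      set c := PySem.List.pyGetD s 0 0 + 2 * PySem.List.pyGetD s 1 0 with hc_def
      have hnext_ne : s.drop 2 ++ [c] ≠ [] := by simp
      have hnext_len : (s.drop 2 ++ [c]).length ≤ n := by
        simp only [List.length_append, List.length_drop, List.length_cons, List.length_nil]
        omega
      rw [← hs_def, hslice, hc_eq,
        ih (s.drop 2 ++ [c]) hnext_len hnext_ne target (steps + 1)]
      -- sorted(s.drop 2 ++ [c]) is exactly the ordered insertion of c into s.drop 2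
      have hpw : (s.drop 2).Pairwise (· ≤ ·) :=
        drop2_pairwise s (by simpa using PySem.List.sorted_pairwise candies (fun x => x))
      have hsorted_eq :
          PySem.List.sorted (s.drop 2 ++ [c]) (fun x => x) false = insortAlt c (s.drop 2) := by
        apply PySem.List.sorted_id_eq_of_perm_of_pairwise
        · exact (insortAlt_perm c (s.drop 2)).trans (List.perm_append_comm (l₁ := [c]) (l₂ := s.drop 2))
        · exact insortAlt_pairwise c (s.drop 2) hpw
      rw [hsorted_eq]
    · rw [dif_neg (fun hA => hc (hcond.mp hA)), dif_neg hc]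
      rw [hmin, hget0]
      rfl

-- ===== VERDICT (by name: the statement is the Claim_ definition above) =====
theorem doSomething_spec : Claim_equal_doSomething := by
  intro candies target _ hpre
  unfold Spec_doSomething doSomething doSomething_alt
  exact loop_eq candies.length candies le_rfl hpre target 0
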